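-- pv_equiv track=rewrite | github.com/tKronos/turtle_maze | jeu_laby.py | optimiser_chemin
-- ===== SOURCE A (Python) =====
-- def optimiser_chemin(mouvements):
--     """
--     La fonction optimiser_chemin sert à simplifier une liste de mouvements en
--     supprimant les mouvements qui s'annulent mutuellement. Par exemple :
--         Si tu avances à droite ('d') puis à gauche ('g'), tu reviens au point
--         de départ, donc ces deux mouvements peuvent être supprimés.
--     """
--     opposes = {'g': 'd', 'd': 'g', 'h': 'b', 'b': 'h'} # Ce dictionnaire associe chaque mouvement à son opposé
--     optimise = [] # C'est une liste vide qui contiendra les mouvements optimisés.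
--     for move in mouvements:
--         if optimise: # si optimise n'est pas vide
--             dernier_move = optimise[-1]
--             # Vérifier si le mouvement actuel annule ce dernier mouvement
--             if opposes.get(move) == dernier_move:
--                 optimise.pop() # Si c’est le cas, on retire le dernier mouvement avec pop()
--                 continue
--         optimise.append(move) # Si le mouvement actuel ne s'annule pas avec le précédent, on l'ajoute à la liste optimisée
--     return optimise
-- ===== SOURCE B (Python) =====
-- def optimiser_chemin(mouvements):
--     opposes = {'g': 'd', 'd': 'g', 'h': 'b', 'b': 'h'}
--
--     def une_passe(xs):
--         out = []
--         i = 0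
--         while i < len(xs):
--             if i + 1 < len(xs) and opposes.get(xs[i + 1]) == xs[i]:
--                 i += 2  # adjacent opposite pair: drop both
--             else:
--                 out.append(xs[i])
--                 i += 1
--         return out
--
--     cur = list(mouvements)
--     while True:
--         nxt = une_passe(cur)
--         if len(nxt) == len(cur):
--             return nxt
--         cur = nxt
-- ===== Notes on version B (the rewrite author's own statement) =====
-- stated objective: alternative
-- what changed: Replaces the running-stack reduction by a fixpoint of left-to-right passes that each merge adjacent opposite pairs, repeated until a pass removes nothing.
import Mathlib
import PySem

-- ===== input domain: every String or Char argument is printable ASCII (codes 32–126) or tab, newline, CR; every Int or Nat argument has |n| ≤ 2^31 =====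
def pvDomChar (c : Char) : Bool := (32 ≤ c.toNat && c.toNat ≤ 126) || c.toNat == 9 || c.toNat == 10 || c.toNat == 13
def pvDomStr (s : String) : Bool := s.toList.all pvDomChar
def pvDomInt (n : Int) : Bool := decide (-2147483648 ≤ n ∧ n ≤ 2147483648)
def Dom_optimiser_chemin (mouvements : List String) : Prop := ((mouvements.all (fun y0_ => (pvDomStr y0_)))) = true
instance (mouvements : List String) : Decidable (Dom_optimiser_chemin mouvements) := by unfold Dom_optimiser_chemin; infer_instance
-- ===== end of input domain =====

-- B replaces A's running-stack reduction by a fixpoint of passes that merge adjacent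
-- opposite pairs (objective: alternative decomposition, same return value).

-- shared: the 'opposes' dict lookup, opposes.get(move)
def oppGet (move : String) : Option String :=
  if move = "g" then some "d"
  else if move = "d" then some "g"
  else if move = "h" then some "b"
  else if move = "b" then some "h"
  else none

-- ===== PORT A =====
-- A's loop body: append, or pop the last element when the move cancels it
def stepA (optimise : List String) (move : String) : List String :=
  match optimise.getLast? with
  | some dernier =>
      if oppGet move = some dernier then optimise.dropLast
      else optimise ++ [move]
  | none => optimise ++ [move]

def optimiser_chemin (mouvements : List String) : List String :=
  mouvements.foldl stepA []

-- ===== PORT B =====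
-- one left-to-right pass: drop each adjacent opposite pair, keep everything else
def unePasse : List String → List String
  | [] => []
  | [x] => [x]
  | x :: y :: rest =>
      if oppGet y = some x then unePasse rest
      else x :: unePasse (y :: rest)

-- needed by fixLoop's termination
theorem unePasse_length_le (xs : List String) : (unePasse xs).length ≤ xs.length := by
  fun_induction unePasse xs with
  | case1 => simp
  | case2 x => simp
  | case3 x y rest hc ih => simp only [List.length_cons] at ih ⊢; omega
  | case4 x y rest hc ih => simp only [List.length_cons] at ih ⊢; omega

-- repeat passes until a pass removes nothing
def fixLoop (cur : List String) : List String :=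
  if (unePasse cur).length = cur.length then unePasse cur else fixLoop (unePasse cur)
termination_by cur.length
decreasing_by
  have := unePasse_length_le cur
  omega

def optimiser_chemin_alt (mouvements : List String) : List String :=
  fixLoop mouvements

-- ===== PRECONDITION & SPEC =====
def Spec_optimiser_chemin (mouvements : List String) (out : List String) : Prop := out = optimiser_chemin_alt mouvements
instance (mouvements : List String) (out : List String) : Decidable (Spec_optimiser_chemin mouvements out) := by unfold Spec_optimiser_chemin; infer_instance

-- ===== CLAIM (what is proved, stated in full; the proofs are below) =====
def Claim_equal_optimiser_chemin : Prop := ∀ (mouvements : List String), Dom_optimiser_chemin mouvements → Spec_optimiser_chemin mouvements (optimiser_chemin mouvements)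

-- ===== LEMMAS AND PROOFS =====

-- proof-side stack reduction, stack kept top-first
def Sred : List String → List String → List String
  | stk, [] => stk.reverse
  | [], m :: ms => Sred [m] ms
  | t :: r, m :: ms =>
      if oppGet m = some t then Sred r ms else Sred (m :: t :: r) ms

-- output-order "no adjacent cancelling pair" relation
def NC (a b : String) : Prop := ¬ oppGet b = some a
-- stack-order version (stack is reversed output)
def GoodStk (stk : List String) : Prop := List.IsChain (fun a b => ¬ oppGet a = some b) stk

theorem oppGet_invol {x y : String} (h : oppGet y = some x) : oppGet x = some y := by
  unfold oppGet at h ⊢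
  split_ifs at h with h1 h2 h3 h4 <;> (injection h with h; subst h; simp_all)

theorem goodStk_tail {t : String} {r : List String} (h : GoodStk (t :: r)) : GoodStk r :=
  h.tail

theorem foldA_eq_Sred (ms : List String) : ∀ stk : List String,
    List.foldl stepA stk.reverse ms = Sred stk ms := by
  induction ms with
  | nil => intro stk; simp [Sred]
  | cons m ms ih =>
    intro stk
    cases stk with
    | nil =>
      simp only [List.foldl, Sred, stepA, List.reverse_nil, List.getLast?_nil,
        List.nil_append]
      exact ih [m]
    | cons t r =>
      have hlast : ((t :: r).reverse).getLast? = some t := by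
        simp
      simp only [List.foldl, Sred, stepA, hlast]
      by_cases hc : oppGet m = some t
      · simp only [if_pos hc]
        have hdrop : ((t :: r).reverse).dropLast = r.reverse := by
          simp
        rw [hdrop]; exact ih r
      · simp only [if_neg hc]
        have : (t :: r).reverse ++ [m] = (m :: t :: r).reverse := by simp
        rw [this]; exact ih (m :: t :: r)

-- pushing the top of a good stack back as a move is a no-op
theorem Sred_push {t : String} {r : List String} (h : GoodStk (t :: r)) (ms : List String) :
    Sred r (t :: ms) = Sred (t :: r) ms := by
  cases r with
  | nil => simp [Sred]
  | cons u r' =>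
    have hnc : ¬ oppGet t = some u := (List.isChain_cons_cons.mp h).1
    simp [Sred, hnc]

-- one pass does not change the stack reduction
theorem Sred_unePasse (xs : List String) : ∀ stk : List String, GoodStk stk →
    Sred stk (unePasse xs) = Sred stk xs := by
  fun_induction unePasse xs with
  | case1 => intro stk h; rfl
  | case2 x => intro stk h; rfl
  | case3 x y rest hc ih =>
    intro stk h
    rw [ih stk h]
    cases stk with
    | nil => simp [Sred, hc]
    | cons t r =>
      by_cases ht : oppGet x = some t
      · have hyx : oppGet x = some y := oppGet_invol hc
        have hty : t = y := by rw [ht] at hyx; exact Option.some.inj hyx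
        subst hty
        simp only [Sred, if_pos ht]
        exact (Sred_push h rest).symm
      · simp [Sred, ht, hc]
  | case4 x y rest hc ih =>
    intro stk h
    cases stk with
    | nil =>
      show Sred [x] (unePasse (y :: rest)) = Sred [x] (y :: rest)
      exact ih [x] (by simp [GoodStk])
    | cons t r =>
      by_cases ht : oppGet x = some t
      · simp only [Sred, if_pos ht]
        exact ih r (goodStk_tail h)
      · simp only [Sred, if_neg ht]
        exact ih (x :: t :: r) (List.isChain_cons_cons.mpr ⟨ht, h⟩)

-- a pass that removes nothing means the list was already fully reduced
theorem unePasse_fix (xs : List String) (h : (unePasse xs).length = xs.length) :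
    unePasse xs = xs ∧ List.IsChain NC xs := by
  fun_induction unePasse xs with
  | case1 => exact ⟨rfl, List.isChain_nil⟩
  | case2 x => exact ⟨rfl, List.isChain_singleton x⟩
  | case3 x y rest hc ih =>
    exfalso
    have hle := unePasse_length_le rest
    simp only [List.length_cons] at h
    omega
  | case4 x y rest hc ih =>
    simp only [List.length_cons] at h
    have h' : (unePasse (y :: rest)).length = (y :: rest).length := by
      simp only [List.length_cons]; omega
    obtain ⟨he, hch⟩ := ih h'
    exact ⟨by rw [he], List.isChain_cons_cons.mpr ⟨hc, hch⟩⟩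

-- a fully reduced list is a fixpoint of the stack reduction
theorem Sred_of_chain (xs : List String) : ∀ stk : List String,
    List.IsChain NC (stk.reverse ++ xs) → Sred stk xs = stk.reverse ++ xs := by
  induction xs with
  | nil => intro stk h; simp [Sred]
  | cons m ms ih =>
    intro stk h
    cases stk with
    | nil =>
      simp only [Sred, List.reverse_nil, List.nil_append] at h ⊢
      have := ih [m] (by simpa using h)
      simpa using this
    | cons t r =>
      have heq : ((t :: r).reverse) ++ m :: ms = r.reverse ++ t :: m :: ms := by
        simp
      rw [heq] at h
      have htm : ¬ oppGet m = some t := by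
        have h2 : List.IsChain NC (t :: m :: ms) := (List.isChain_append.mp h).2.1
        exact (List.isChain_cons_cons.mp h2).1
      simp only [Sred, if_neg htm]
      have heq2 : ((m :: t :: r).reverse) ++ ms = r.reverse ++ t :: m :: ms := by
        simp
      rw [ih (m :: t :: r) (by rw [heq2]; exact h), heq2, ← heq]

-- fixLoop preserves the stack reduction and ends fully reduced
theorem fixLoop_props (cur : List String) :
    Sred [] (fixLoop cur) = Sred [] cur ∧ List.IsChain NC (fixLoop cur) := by
  fun_induction fixLoop cur with
  | case1 cur h =>
    obtain ⟨he, hch⟩ := unePasse_fix cur h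
    rw [he]
    exact ⟨rfl, hch⟩
  | case2 cur h ih =>
    obtain ⟨h1, h2⟩ := ih
    refine ⟨?_, h2⟩
    rw [h1]
    exact Sred_unePasse cur [] (by simp [GoodStk])

-- ===== VERDICT (by name: the statement is the Claim_ definition above) =====
theorem optimiser_chemin_spec : Claim_equal_optimiser_chemin := by
  intro mouvements _
  unfold Spec_optimiser_chemin optimiser_chemin optimiser_chemin_alt
  obtain ⟨h1, h2⟩ := fixLoop_props mouvements
  have ha : List.foldl stepA [] mouvements = Sred [] mouvements := by
    simpa using foldA_eq_Sred mouvements []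
  have hb : fixLoop mouvements = Sred [] (fixLoop mouvements) := by
    have := Sred_of_chain (fixLoop mouvements) [] (by simpa using h2)
    simpa using this.symm
  rw [ha, hb, h1]
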